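-- pv_equiv track=rewrite | github.com/foodisbeast/CSCI203 | hw08/hw8pr3.py | vertTest
-- ===== SOURCE A (Python) =====
-- def vertTest(a,sum):
-- 	h = len(a)
-- 	w = len(a[0])
-- 	for x in range(w):
-- 		vertSum = 0
-- 		for y in range(h):
-- 			vertSum += a[y][x]
-- 		if vertSum != sum:
-- 			return False
-- 	return True
-- ===== SOURCE B (Python) =====
-- def vertTest(a, sum):
--     w = len(a[0])
--     colsums = [0] * w
--     for row in a:
--         for x in range(w):
--             colsums[x] += row[x]
--     return all(s == sum for s in colsums)
-- ===== Notes on version B (the rewrite author's own statement) =====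
-- stated objective: alternative
-- what changed: Replaces A's columns-outer scan that recomputes one scalar column sum per column with a single rows-outer pass maintaining a vector of all partial column sums, checked against the target at the end.
-- outside the precondition, e.g. on vertTest([[1, 2], [3]], 99): A returns False, B raises IndexError
import Mathlib
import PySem

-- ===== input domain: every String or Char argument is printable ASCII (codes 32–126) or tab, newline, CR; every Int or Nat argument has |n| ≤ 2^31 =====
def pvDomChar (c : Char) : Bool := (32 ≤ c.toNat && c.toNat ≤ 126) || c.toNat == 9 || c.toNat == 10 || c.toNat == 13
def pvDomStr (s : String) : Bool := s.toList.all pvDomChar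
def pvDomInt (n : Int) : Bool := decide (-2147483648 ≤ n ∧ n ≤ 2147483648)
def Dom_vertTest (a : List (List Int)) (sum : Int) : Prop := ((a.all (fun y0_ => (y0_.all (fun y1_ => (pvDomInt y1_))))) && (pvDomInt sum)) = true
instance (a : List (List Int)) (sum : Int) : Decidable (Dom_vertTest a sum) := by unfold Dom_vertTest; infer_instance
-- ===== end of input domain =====

-- B rebuilds the column check rows-outer with a vector of partial column sums instead of A's
-- columns-outer scalar re-scan (objective: alternative decomposition, same cost; return value only).

-- ===== PORT A =====
-- the 'for x in range(w)' loop with its early 'return False'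
def vertTestLoopA (a : List (List Int)) (sum h : Int) (xs : List Int) : Bool :=
  match xs with
  | [] => true
  | x :: rest =>
      let vertSum := (PySem.List.pyRange 0 h 1).foldl
        (fun s y => s + PySem.List.pyGetD (PySem.List.pyGetD a y []) x 0) 0
      if vertSum ≠ sum then false else vertTestLoopA a sum h rest

def vertTest (a : List (List Int)) (sum : Int) : Bool :=
  let h : Int := PySem.List.len a
  let w : Int := PySem.List.len (PySem.List.pyGetD a 0 [])
  vertTestLoopA a sum h (PySem.List.pyRange 0 w 1)

-- ===== PORT B =====
def vertTest_alt (a : List (List Int)) (sum : Int) : Bool :=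
  let w : Int := PySem.List.len (PySem.List.pyGetD a 0 [])
  let colsums0 : List Int := PySem.List.pyRepeat [0] w
  let colsums := a.foldl (fun cs row =>
      (PySem.List.pyRange 0 w 1).foldl
        (fun cs x => PySem.List.pySetD cs x (PySem.List.pyGetD cs x 0 + PySem.List.pyGetD row x 0)) cs)
    colsums0
  colsums.all (fun s => s == sum)

-- ===== PRECONDITION & SPEC =====
-- Pre_ excludes the empty matrix (A raises IndexError on a[0]) and matrices with a row shorter
-- than the first row, on which A either raises IndexError or happens to return False before
-- reaching the short row, while B's column accumulator indexes every row and raises IndexError.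
def Pre_vertTest (a : List (List Int)) (sum : Int) : Prop :=
  a ≠ [] ∧ ∀ r ∈ a, (a.headD []).length ≤ r.length
instance (a : List (List Int)) (sum : Int) : Decidable (Pre_vertTest a sum) := by
  unfold Pre_vertTest; infer_instance
def pvWitness_vertTest : List (List Int) × Int := ([[1, 2], [0, -1]], 1)

def Spec_vertTest (a : List (List Int)) (sum : Int) (out : Bool) : Prop := out = vertTest_alt a sum
instance (a : List (List Int)) (sum : Int) (out : Bool) : Decidable (Spec_vertTest a sum out) := by unfold Spec_vertTest; infer_instance

-- ===== CLAIM (what is proved, stated in full; the proofs are below) =====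
def Claim_equal_vertTest : Prop := ∀ (a : List (List Int)) (sum : Int), Dom_vertTest a sum → Pre_vertTest a sum → Spec_vertTest a sum (vertTest a sum)

-- ===== LEMMAS AND PROOFS =====

-- A's outer loop with early return is an 'all' over the columns
theorem vertTestLoopA_eq_all (a : List (List Int)) (sum h : Int) (xs : List Int) :
    vertTestLoopA a sum h xs =
      xs.all (fun x => (PySem.List.pyRange 0 h 1).foldl
        (fun s y => s + PySem.List.pyGetD (PySem.List.pyGetD a y []) x 0) 0 == sum) := by
  induction xs with
  | nil => rfl
  | cons x rest ih =>
      simp only [vertTestLoopA, List.all_cons, ih]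
      by_cases hx : (PySem.List.pyRange 0 h 1).foldl
          (fun s y => s + PySem.List.pyGetD (PySem.List.pyGetD a y []) x 0) 0 = sum
      · simp [hx]
      · simp [hx]

-- B's inner index loop over one row adds the row entrywise to the accumulator
theorem inner_fold_eq_map (row cs : List Int) (w : Nat) (hw : w ≤ cs.length) :
    (PySem.List.pyRange 0 (w : Int) 1).foldl
        (fun cs x => PySem.List.pySetD cs x (PySem.List.pyGetD cs x 0 + PySem.List.pyGetD row x 0)) cs
      = (List.range w).map (fun k => cs.getD k 0 + row.getD k 0) ++ cs.drop w := by
  induction w with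
  | zero => simp [PySem.List.pyRange_one_eq_nil]
  | succ n ih =>
      have hn : n ≤ cs.length := Nat.le_of_succ_le hw
      have hlt : n < cs.length := hw
      have hsplit : PySem.List.pyRange 0 ((n + 1 : Nat) : Int) 1
          = PySem.List.pyRange 0 (n : Int) 1 ++ [(n : Int)] := by
        have := PySem.List.pyRange_one_succ_right (a := 0) (b := (n : Int)) (Int.natCast_nonneg n)
        simpa using this
      rw [hsplit, List.foldl_append, ih hn]
      have hpre : ((List.range n).map (fun k => cs.getD k 0 + row.getD k 0)).length = n := by simp
      set P := (List.range n).map (fun k => cs.getD k 0 + row.getD k 0) with hP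
      simp only [List.foldl_cons, List.foldl_nil]
      have hget : PySem.List.pyGetD (P ++ cs.drop n) ((n : Nat) : Int) 0 = cs.getD n 0 := by
        rw [PySem.List.pyGetD_natCast]
        have : (P ++ cs.drop n).getD n 0 = (cs.drop n).getD 0 0 := by
          rw [List.getD_eq_getElem?_getD, List.getD_eq_getElem?_getD,
              List.getElem?_append_right (by omega), hpre, Nat.sub_self]
        rw [this]
        simp [List.getD_eq_getElem?_getD, hlt]
      rw [hget, PySem.List.pySetD_natCast]
      rw [List.range_succ, List.map_append, List.map_singleton, List.append_assoc]
      rw [List.set_append_right _ _ (by omega), hpre, Nat.sub_self]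
      rw [List.drop_eq_getElem_cons hlt, List.set_cons_zero]
      rw [hP]
      simp [List.getD_eq_getElem?_getD]

-- B's row loop keeps colsums = pointwise partial column sums
theorem outer_fold_eq_map (rows : List (List Int)) (w : Nat) (g : Nat → Int)
    (hrows : ∀ r ∈ rows, w ≤ r.length) :
    rows.foldl (fun cs row =>
        (PySem.List.pyRange 0 (w : Int) 1).foldl
          (fun cs x => PySem.List.pySetD cs x (PySem.List.pyGetD cs x 0 + PySem.List.pyGetD row x 0)) cs)
      ((List.range w).map g)
    = (List.range w).map (fun k => g k + (rows.map (fun r => r.getD k 0)).sum) := by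
  induction rows generalizing g with
  | nil => simp
  | cons r rows ih =>
      simp only [List.foldl_cons]
      rw [inner_fold_eq_map r ((List.range w).map g) w (by simp)]
      have hd : ((List.range w).map g).drop w = [] := by simp
      rw [hd, List.append_nil]
      have hmap : (List.range w).map (fun k => ((List.range w).map g).getD k 0 + r.getD k 0)
          = (List.range w).map (fun k => g k + r.getD k 0) := by
        apply List.map_congr_left
        intro k hk
        rw [List.mem_range] at hk
        simp [List.getD_eq_getElem?_getD, List.getElem?_map, List.getElem?_range hk]
      rw [hmap, ih (fun k => g k + r.getD k 0) (fun r hr => hrows r (List.mem_cons_of_mem _ hr))]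
      apply List.map_congr_left
      intro k _
      simp [add_assoc]

-- 'all' respects a pointwise-on-members equality of predicates
theorem all_congr_mem {alpha : Type} {l : List alpha} {p q : alpha → Bool}
    (h : ∀ x ∈ l, p x = q x) : l.all p = l.all q := by
  induction l with
  | nil => rfl
  | cons a t ih => simp_all

-- ===== VERDICT (by name: the statement is the Claim_ definition above) =====
theorem vertTest_spec : Claim_equal_vertTest := by
  intro a sum _ hpre
  obtain ⟨hne, hlen⟩ := hpre
  obtain ⟨r0, rs, rfl⟩ := List.exists_cons_of_ne_nil hne
  simp only [Spec_vertTest, vertTest, vertTest_alt]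
  set w : Nat := r0.length with hw
  have hhead : PySem.List.pyGetD (r0 :: rs) 0 ([] : List Int) = r0 :=
    PySem.List.pyGetD_zero_cons r0 rs []
  rw [vertTestLoopA_eq_all]
  have hwcast : PySem.List.len (PySem.List.pyGetD (r0 :: rs) 0 ([] : List Int)) = (w : Int) := by
    rw [hhead]; simp [PySem.List.len_eq, hw]
  rw [hwcast]
  -- B side: initial [0]*w and the row fold
  have hrep : PySem.List.pyRepeat [(0 : Int)] (w : Int) = (List.range w).map (fun _ => (0 : Int)) := by
    rw [PySem.List.pyRepeat_singleton]
    simp [List.map_const']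
  rw [hrep, outer_fold_eq_map (r0 :: rs) w (fun _ => 0) (fun r hr => hlen r hr)]
  -- both sides become an 'all' over List.range w
  rw [PySem.List.pyRange_one 0 (w : Int)]
  simp only [sub_zero, Int.toNat_natCast, zero_add]
  rw [List.all_map, List.all_map]
  apply all_congr_mem
  intro k hk
  simp only [Function.comp, PySem.List.len_eq]
  -- A's column sum at column k equals B's accumulated entry at k
  have hcol : (PySem.List.pyRange 0 (((r0 :: rs).length : Nat) : Int) 1).foldl
      (fun s y => s + PySem.List.pyGetD (PySem.List.pyGetD (r0 :: rs) y []) ((k : Nat) : Int) 0) 0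
      = ((r0 :: rs).map (fun r => r.getD k 0)).sum := by
    rw [PySem.List.foldl_pyRange_zero_pyGetD' (r0 :: rs) ([] : List Int)
        (fun s row => s + PySem.List.pyGetD row ((k : Nat) : Int) 0) 0]
    rw [PySem.List.foldl_add]
    simp [PySem.List.pyGetD_natCast]
  rw [hcol]
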